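-- pv_equiv track=rewrite | github.com/jiayong1/spellchecker | functional.py | reductions
-- ===== SOURCE A (Python) =====
-- from itertools import product
--
-- def numberofdupes(string, idx):
--     """return the number of times in a row the letter at index idx is duplicated"""
--     # "abccdefgh", 2  returns 1
--     initial_idx = idx
--     last = string[idx]
--     while idx+1 < len(string) and string[idx+1] == last:
--         idx += 1
--     return idx-initial_idx
--
-- def reductions(word):
--     """return flat option list of all possible variations of the word by removing duplicate letters"""
--     word = list(word)
--     # ['h','i', 'i', 'i'] becomes ['h', ['i', 'ii', 'iii']]
--     for idx, l in enumerate(word):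
--         n = numberofdupes(word, idx)
--         # if letter appears more than once in a row
--         if n:
--             # generate a flat list of options ('hhh' becomes ['h','hh','hhh'])
--             flat_dupes = [l*(r+1) for r in range(n+1)][:3] # only take up to 3, there are no 4 letter repetitions in english
--             # remove duplicate letters in original word
--             for _ in range(n):
--                 word.pop(idx+1)
--             # replace original letter with flat list
--             word[idx] = flat_dupes
--
--     # ['h',['i','ii','iii']] becomes 'hi','hii','hiii'
--     for p in product(*word):
--         yield ''.join(p)
-- ===== SOURCE B (Python) =====
-- from itertools import product, groupby
--
-- def reductions(word):
--     """return flat option list of all possible variations of the word by removing duplicate letters"""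
--     lists = []
--     for c, group in groupby(word):
--         run = sum(1 for _ in group)
--         lists.append([c * k for k in range(1, min(run, 3) + 1)])
--     for p in product(*lists):
--         yield ''.join(p)
-- ===== Notes on version B (the rewrite author's own statement) =====
-- stated objective: simpler
-- what changed: B walks the word once with itertools.groupby, building each run's option list directly, instead of A's numberofdupes helper plus in-place pop/enumerate mutation of the word list.
import Mathlib
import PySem

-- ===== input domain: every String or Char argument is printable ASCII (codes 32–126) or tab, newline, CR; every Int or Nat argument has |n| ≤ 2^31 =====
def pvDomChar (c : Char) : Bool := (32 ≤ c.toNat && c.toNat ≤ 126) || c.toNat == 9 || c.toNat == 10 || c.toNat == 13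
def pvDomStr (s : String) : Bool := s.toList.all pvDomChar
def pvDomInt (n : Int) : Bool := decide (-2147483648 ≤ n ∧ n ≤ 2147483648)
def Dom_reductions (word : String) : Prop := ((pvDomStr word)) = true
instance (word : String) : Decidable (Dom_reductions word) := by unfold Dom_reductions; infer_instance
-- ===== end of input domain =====

-- B replaces A's numberofdupes helper and in-place pop/enumerate mutation with a single
-- forward groupby pass building the per-run option lists (objective: simpler).

-- ===== PORT A =====
-- A mutates a local copy of the word (a Python list whose cells hold either a single
-- character or a list of option strings); Item models such a cell.
inductive Item
  | chr : Char → Item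
  | opts : List String → Item
deriving DecidableEq, Repr, Inhabited

-- Python `l*(r+1)` in the n ≠ 0 branch; there l is always a single character
-- (the branch requires an equal neighbour, and lists never sit next to each other),
-- so the opts case is unreachable.
def itemMul (it : Item) (k : Nat) : String :=
  match it with
  | .chr c => String.mk (List.replicate k c)
  | .opts _ => ""

-- the `while idx+1 < len(string) and string[idx+1] == last: idx += 1` loop; returns the final idx
-- (the bounds test plus indexed access is transcribed as the optional access `[idx+1]?`)
def ndAux (items : List Item) (last : Item) (idx : Nat) : Nat :=
  if h : items[idx+1]? = some last then
    ndAux items last (idx+1)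
  else idx
termination_by items.length - idx
decreasing_by
  obtain ⟨hlt, -⟩ := List.getElem?_eq_some_iff.mp h
  omega

def numberofdupes (items : List Item) (idx : Nat) : Nat :=
  ndAux items items[idx]! idx - idx

-- iterating one element of the final list inside product(): a character yields itself,
-- a list of options yields its options
def itemOptions (it : Item) : List String :=
  match it with
  | .chr c => [String.mk [c]]
  | .opts l => l

-- the `for idx, l in enumerate(word)` loop over the live, mutated list
def loopA (items : List Item) (idx : Nat) : List Item :=
  if h : idx < items.length then
    let l := items[idx]!
    let n := numberofdupes items idx
    if n ≠ 0 then
      let flat := ((List.range (n+1)).map (fun r => itemMul l (r+1))).take 3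
      loopA (items.take idx ++ Item.opts flat :: items.drop (idx+1+n)) (idx+1)
    else
      loopA items (idx+1)
  else items
termination_by items.length - idx
decreasing_by
  · simp only [List.length_append, List.length_take, List.length_cons, List.length_drop]
    omega
  · omega

def reductions (word : String) : List String :=
  (loopA (word.toList.map Item.chr) 0).foldl
    (fun acc it => acc.flatMap (fun s => (itemOptions it).map (fun o => s ++ o))) [""]

-- ===== PORT B =====
-- groupby(word): maximal runs of equal consecutive characters, each turned into its option list
def runLists : List Char → List (List String)
  | [] => []
  | c :: cs =>
    let run := 1 + (cs.takeWhile (· == c)).length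
    ((List.range (min run 3)).map (fun k => String.mk (List.replicate (k+1) c)))
      :: runLists (cs.dropWhile (· == c))
termination_by l => l.length
decreasing_by
  have := List.length_dropWhile_le (· == c) cs
  simp only [List.length_cons]
  omega

def reductions_alt (word : String) : List String :=
  (runLists word.toList).foldl
    (fun acc os => acc.flatMap (fun s => os.map (fun o => s ++ o))) [""]

-- ===== PRECONDITION & SPEC =====
def Spec_reductions (word : String) (out : List String) : Prop := out = reductions_alt word
instance (word : String) (out : List String) : Decidable (Spec_reductions word out) := by unfold Spec_reductions; infer_instance

-- ===== CLAIM (what is proved, stated in full; the proofs are below) =====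
def Claim_equal_reductions : Prop := ∀ (word : String), Dom_reductions word → Spec_reductions word (reductions word)

-- ===== LEMMAS AND PROOFS =====

-- what A's mutation loop turns one maximal run into
def optsOf (c : Char) (n : Nat) : List String :=
  ((List.range (n+1)).map (fun r => String.mk (List.replicate (r+1) c))).take 3

def runsItems : List Char → List Item
  | [] => []
  | c :: cs =>
    let t := cs.takeWhile (· == c)
    (if t.length = 0 then Item.chr c else Item.opts (optsOf c t.length))
      :: runsItems (cs.dropWhile (· == c))
termination_by l => l.length
decreasing_by
  have := List.length_dropWhile_le (· == c) cs
  simp only [List.length_cons]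
  omega

theorem head?_dropWhile {α : Type} (p : α → Bool) :
    ∀ (l : List α) (x : α), (l.dropWhile p).head? = some x → p x = false := by
  intro l
  induction l with
  | nil => intro x h; simp [List.dropWhile] at h
  | cons a l ih =>
    intro x h
    by_cases hp : p a
    · rw [List.dropWhile_cons_of_pos hp] at h; exact ih x h
    · rw [List.dropWhile_cons_of_neg hp] at h
      simp only [List.head?_cons, Option.some.injEq] at h
      rw [← h]
      simpa using hp

theorem ndAux_spec (c : Char) :
    ∀ (t : List Char) (pre u : List Item),
      (∀ x ∈ t, x = c) → (∀ v, u.head? = some v → v ≠ Item.chr c) →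
      ndAux (pre ++ Item.chr c :: (t.map Item.chr ++ u)) (Item.chr c) pre.length
        = pre.length + t.length := by
  intro t
  induction t with
  | nil =>
    intro pre u _ hu
    simp only [List.map_nil, List.nil_append]
    rw [ndAux.eq_def]
    rw [dif_neg]
    · simp
    · rw [show pre ++ Item.chr c :: u = (pre ++ [Item.chr c]) ++ u by simp]
      rw [List.getElem?_append_right (by simp)]
      simp only [List.length_append, List.length_cons, List.length_nil,
        Nat.sub_self]
      cases u with
      | nil => simp
      | cons v u' =>
        simp only [List.getElem?_cons_zero]
        intro hv
        exact hu v rfl (by simpa using hv)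
  | cons a t' ih =>
    intro pre u ht hu
    have ha : a = c := ht a (by simp)
    subst ha
    rw [ndAux.eq_def]
    rw [dif_pos]
    · have : pre ++ Item.chr a :: ((a :: t').map Item.chr ++ u)
          = (pre ++ [Item.chr a]) ++ Item.chr a :: (t'.map Item.chr ++ u) := by
        simp
      rw [this]
      have hlen : pre.length + 1 = (pre ++ [Item.chr a]).length := by simp
      rw [hlen]
      rw [ih (pre ++ [Item.chr a]) u (fun x hx => ht x (by simp [hx])) hu]
      simp only [List.length_append, List.length_cons, List.length_nil]
      omega
    · rw [List.getElem?_append_right (by omega)]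
      simp

theorem loopA_spec_aux :
    ∀ (n : Nat) (rem : List Char) (pre : List Item), rem.length ≤ n →
      loopA (pre ++ rem.map Item.chr) pre.length = pre ++ runsItems rem := by
  intro n
  induction n with
  | zero =>
    intro rem pre hn
    have : rem = [] := List.eq_nil_of_length_eq_zero (by omega)
    subst this
    rw [loopA.eq_def, runsItems]
    simp
  | succ n ih =>
    intro rem pre hn
    match rem with
    | [] =>
      rw [loopA.eq_def, runsItems]
      simp
    | c :: cs =>
      set t := cs.takeWhile (· == c) with ht
      set d := cs.dropWhile (· == c) with hd
      have hcs : cs = t ++ d := (List.takeWhile_append_dropWhile).symm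
      have htc : ∀ x ∈ t, x = c := by
        intro x hx
        have := List.mem_takeWhile_imp (ht ▸ hx)
        simpa using this
      have hdc : ∀ v, (d.map Item.chr).head? = some v → v ≠ Item.chr c := by
        intro v hv
        rw [List.head?_map] at hv
        cases hvd : d.head? with
        | none => rw [hvd] at hv; simp at hv
        | some w =>
          have hw : (w == c) = false := head?_dropWhile (· == c) cs w (hd ▸ hvd)
          rw [hvd] at hv
          simp only [Option.map_some, Option.some.injEq] at hv
          rw [← hv]
          intro hcontra
          rw [Item.chr.inj hcontra] at hw
          simp at hw
      have hlist : (c :: cs).map Item.chr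
          = Item.chr c :: (t.map Item.chr ++ d.map Item.chr) := by
        rw [hcs]; simp
      have hnd : numberofdupes (pre ++ (c :: cs).map Item.chr) pre.length = t.length := by
        unfold numberofdupes
        have hget : (pre ++ (c :: cs).map Item.chr)[pre.length]! = Item.chr c := by
          rw [hlist, List.getElem!_eq_getElem?_getD,
            List.getElem?_append_right (by omega)]
          simp
        rw [hget, hlist, ndAux_spec c t pre (d.map Item.chr) htc hdc]
        omega
      have hget : (pre ++ (c :: cs).map Item.chr)[pre.length]! = Item.chr c := by
        rw [hlist, List.getElem!_eq_getElem?_getD,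
          List.getElem?_append_right (by omega)]
        simp
      rw [loopA.eq_def]
      rw [dif_pos (by simp)]
      simp only [hnd, hget]
      by_cases h0 : t.length = 0
      · -- run of length 1: the letter is left in place
        simp only [h0, ne_eq, not_true_eq_false, if_false]
        have hd1 : d = cs := by
          rw [hcs, List.eq_nil_of_length_eq_zero h0, List.nil_append]
        have : pre ++ (c :: cs).map Item.chr = (pre ++ [Item.chr c]) ++ cs.map Item.chr := by
          simp
        rw [this, show pre.length + 1 = (pre ++ [Item.chr c]).length by simp]
        rw [ih cs (pre ++ [Item.chr c]) (by simp at hn; omega)]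
        rw [runsItems]
        simp only [← ht, h0, ← hd, hd1]
        simp
      · -- run of length ≥ 2: collapsed into its option list
        simp only [ne_eq, h0, not_false_eq_true, if_true]
        have htake : (pre ++ (c :: cs).map Item.chr).take pre.length = pre := by
          rw [List.take_append_of_le_length (by simp)]
          simp
        have hdrop : (pre ++ (c :: cs).map Item.chr).drop (pre.length + 1 + t.length)
            = d.map Item.chr := by
          rw [hlist, show pre ++ Item.chr c :: (t.map Item.chr ++ d.map Item.chr)
              = (pre ++ Item.chr c :: t.map Item.chr) ++ d.map Item.chr by simp]
          rw [List.drop_append_of_le_length (by simp only [List.length_append,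
            List.length_cons, List.length_map]; omega)]
          rw [List.drop_eq_nil_of_le (by simp only [List.length_append,
            List.length_cons, List.length_map]; omega)]
          simp
        rw [htake, hdrop]
        have hflat : ((List.range (t.length + 1)).map (fun r => itemMul (Item.chr c) (r+1))).take 3
            = optsOf c t.length := by
          unfold optsOf itemMul
          simp
        rw [hflat]
        rw [show pre ++ Item.opts (optsOf c t.length) :: d.map Item.chr
            = (pre ++ [Item.opts (optsOf c t.length)]) ++ d.map Item.chr by simp]
        rw [show pre.length + 1 = (pre ++ [Item.opts (optsOf c t.length)]).length by simp]
        have hdlen : d.length ≤ n := by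
          have := congrArg List.length hcs
          simp at this hn
          omega
        rw [ih d (pre ++ [Item.opts (optsOf c t.length)]) hdlen]
        rw [runsItems]
        simp only [← ht, ← hd, h0]
        simp

theorem loopA_spec (rem : List Char) (pre : List Item) :
    loopA (pre ++ rem.map Item.chr) pre.length = pre ++ runsItems rem :=
  loopA_spec_aux rem.length rem pre le_rfl

theorem map_itemOptions_runsItems :
    ∀ (l : List Char), (runsItems l).map itemOptions = runLists l := by
  intro l
  induction l using runLists.induct with
  | case1 => rw [runsItems, runLists]; rfl
  | case2 c cs ih =>
    rw [runsItems, runLists]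
    simp only [List.map_cons, ih]
    congr 1
    by_cases h0 : (cs.takeWhile (· == c)).length = 0
    · simp [h0, itemOptions]
    · simp only [if_neg h0, itemOptions, optsOf]
      rw [← List.map_take, List.take_range]
      have hm : min 3 ((cs.takeWhile (· == c)).length + 1)
          = min (1 + (cs.takeWhile (· == c)).length) 3 := by omega
      simp [hm]

-- ===== VERDICT (by name: the statement is the Claim_ definition above) =====
theorem reductions_spec : Claim_equal_reductions := by
  intro word _
  unfold Spec_reductions reductions reductions_alt
  have h0 : loopA (word.toList.map Item.chr) 0 = runsItems word.toList := by
    have := loopA_spec word.toList []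
    simpa using this
  rw [h0, ← map_itemOptions_runsItems, List.foldl_map]
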